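-- pv_equiv track=rewrite | github.com/elrion018/CS_study | beakjoon_PS/no17144.py | wind_dust
-- ===== SOURCE A (Python) =====
-- def wind_dust(r,c, room):
-- 		cleaner_y = None
-- 		for y in range(r):
-- 			for x in range(c):
-- 				if room[y][x] == -1:
-- 					cleaner_y = y
-- 					break
--
-- 		area1 = room[0:cleaner_y]
-- 		area2 = room[cleaner_y:]
--
-- 		# area 1 (반시계 방향)
-- 		area1 = wind_area1(area1,c)
-- 		area2 = wind_area2(area2,c)
--
--
-- 		return area1 + area2
--
-- def wind_area1(area1,c):
-- 		temp = [[0]*c for _ in range(len(area1))]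
-- 		for y in range(len(area1)):
-- 			for x in range(c):
-- 				if y-1 < 0 and x-1 < 0: #왼쪽 상단 구석
-- 					temp[y+1][x] = area1[y][x]
-- 				elif y-1 <0 and x +1 == c: #오른쪽 상단 구석
-- 					temp[y][x-1] = area1[y][x]
-- 				elif y+1 == len(area1) and x -1 <0: # 왼쪽 하단 구석
-- 					temp[y][x+1] = area1[y][x]
-- 				elif y+1 == len(area1) and x + 1 == c: # 오른쪽 하단 구석
-- 					temp[y-1][x] = area1[y][x]
-- 				elif y-1 <0:
-- 						temp[y][x-1] = area1[y][x]
-- 				elif y+1 == len(area1):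
-- 						temp[y][x+1] = area1[y][x]
-- 				elif x-1 <0:
-- 						temp[y+1][x] = area1[y][x]
-- 				elif x+1 == c:
-- 						temp[y-1][x] = area1[y][x]
-- 				else:
-- 						temp[y][x] = area1[y][x]
--
-- 		area1 = overwrite_area(temp, area1, c)
-- 		return area1
--
-- def wind_area2(area2,c):
-- 		temp = [[0]*c for _ in range(len(area2))]
-- 		for y in range(len(area2)):
-- 			for x in range(c):
-- 				if y-1 < 0 and x-1 < 0: #왼쪽 상단 구석
-- 					temp[y][x+1] = area2[y][x]
-- 				elif y-1 <0 and x +1 == c: #오른쪽 상단 구석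
-- 					temp[y+1][x] = area2[y][x]
-- 				elif y+1 == len(area2) and x -1 <0: # 왼쪽 하단 구석
-- 					temp[y-1][x] = area2[y][x]
-- 				elif y+1 == len(area2) and x + 1 == c: # 오른쪽 하단 구석
-- 					temp[y][x-1] = area2[y][x]
-- 				elif y-1 <0:
-- 						temp[y][x+1] = area2[y][x]
-- 				elif y+1 == len(area2):
-- 						temp[y][x-1] = area2[y][x]
-- 				elif x-1 <0:
-- 						temp[y-1][x] = area2[y][x]
-- 				elif x+1 == c:
-- 						temp[y+1][x] = area2[y][x]
-- 				else:
-- 						temp[y][x] = area2[y][x]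
--
-- 		area2 = overwrite_area(temp, area2, c)
-- 		return area2
--
-- def overwrite_area(temp, area,c):
-- 		for y in range(len(area)):
-- 			for x in range(c):
-- 					if area[y][x] != -1:
-- 							if temp[y][x] == -1:
-- 								area[y][x] = 0
-- 							else:
-- 								area[y][x] = temp[y][x]
--
-- 		return area
-- ===== SOURCE B (Python) =====
-- # Gather-based in-place rewrite: each region's cells take the value of their unique
-- # upstream ring neighbour (computed first, then written back into the region's rows).
-- # Like the original, this updates the grid's rows in place.
--
-- def _upstream_ccw(h, c, y, x):
--     # counterclockwise flow: left column down, bottom row right,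
--     # right column up, top row left; interior cells keep their own value.
--     if x == 0 and y > 0:
--         return y - 1, 0
--     if y == h - 1:
--         return y, x - 1
--     if x == c - 1:
--         return y + 1, x
--     if y == 0:
--         return y, x + 1
--     return y, x
--
-- def _upstream_cw(h, c, y, x):
--     # clockwise flow: top row right, right column down,
--     # bottom row left, left column up.
--     if y == 0 and x > 0:
--         return 0, x - 1
--     if x == c - 1:
--         return y - 1, x
--     if y == h - 1:
--         return y, x + 1
--     if x == 0:
--         return y + 1, 0
--     return y, x
--
-- def _blow_in_place(area, c, upstream):
--     h = len(area)
--     updates = []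
--     for y in range(h):
--         for x in range(c):
--             if area[y][x] != -1:
--                 sy, sx = upstream(h, c, y, x)
--                 v = area[sy][sx]
--                 updates.append((y, x, 0 if v == -1 else v))
--     for y, x, v in updates:
--         area[y][x] = v
--
-- def wind_dust(r, c, room):
--     cleaner_y = None
--     for y in range(r):
--         if any(room[y][x] == -1 for x in range(c)):
--             cleaner_y = y
--     result = []
--     for region, upstream in ((room[:cleaner_y], _upstream_ccw),
--                              (room[cleaner_y:], _upstream_cw)):
--         _blow_in_place(region, c, upstream)
--         result += region
--     return result
-- ===== Notes on version B (the rewrite author's own statement) =====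
-- stated objective: alternative
-- what changed: A scatters every cell into a zeroed temp grid through a 9-way positional branch and then merges the temp grid back in a second overwrite pass; B computes, per region, each cell's new value directly from its unique upstream ring neighbour (interior cells from themselves) and writes the batch back into the region's rows in place, with no temp grid and no merge pass; Pre_ excludes the degenerate shapes (c=1, a one-row region, r or a row shorter than scanned) on which A raises IndexError.
import Mathlib
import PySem

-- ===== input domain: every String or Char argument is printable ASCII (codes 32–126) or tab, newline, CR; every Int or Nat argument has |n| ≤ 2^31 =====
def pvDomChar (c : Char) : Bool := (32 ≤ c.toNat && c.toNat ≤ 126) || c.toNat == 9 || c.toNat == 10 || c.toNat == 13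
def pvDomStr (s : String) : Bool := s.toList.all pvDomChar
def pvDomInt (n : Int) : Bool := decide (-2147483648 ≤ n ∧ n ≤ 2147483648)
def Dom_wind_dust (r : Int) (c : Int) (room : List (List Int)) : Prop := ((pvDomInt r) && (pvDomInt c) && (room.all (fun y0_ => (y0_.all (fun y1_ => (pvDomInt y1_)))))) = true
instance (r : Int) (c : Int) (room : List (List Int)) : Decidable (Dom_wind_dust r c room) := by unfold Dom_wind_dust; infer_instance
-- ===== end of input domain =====

-- B replaces A's scatter-into-temp-grid plus merge pass with a per-region gather pass that
-- computes each cell from its unique upstream ring cell and writes the batch back in place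
-- (both A and B mutate `room`'s rows in place; the equivalence proved is about the return value).

-- ===== PORT A =====

-- Python list assignment `xs[i] = v` (negative index counts from the end; an out-of-range
-- index is an IndexError in Python — those inputs are excluded by Pre_; the port is a no-op there).
def pySet1 (xs : List Int) (i : Int) (v : Int) : List Int :=
  let j := if i < 0 then i + xs.length else i
  if 0 ≤ j ∧ j < (xs.length : Int) then xs.set j.toNat v else xs

-- Python `g[y][x] = v` on a grid, same convention.
def pySet2 (g : List (List Int)) (y : Int) (x : Int) (v : Int) : List (List Int) :=
  let j := if y < 0 then y + g.length else y
  if 0 ≤ j ∧ j < (g.length : Int) then g.modify j.toNat (fun row => pySet1 row x v) else g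

-- Python `g[y][x]` read; reads are in range on every input admitted by Pre_ (default never used there).
def pvGet2 (g : List (List Int)) (y : Int) (x : Int) : Int :=
  PySem.List.pyGetD (PySem.List.pyGetD g y []) x 0

def pvOverwriteArea (temp : List (List Int)) (area : List (List Int)) (c : Int) : List (List Int) :=
  (PySem.List.pyRange 0 (area.length : Int) 1).foldl (fun area' y =>
    (PySem.List.pyRange 0 c 1).foldl (fun area' x =>
      if pvGet2 area' y x ≠ -1 then
        (if pvGet2 temp y x = -1 then pySet2 area' y x 0
         else pySet2 area' y x (pvGet2 temp y x))
      else area') area') area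

def pvWindArea1 (area1 : List (List Int)) (c : Int) : List (List Int) :=
  let h : Int := (area1.length : Int)
  let temp0 : List (List Int) := List.replicate area1.length (List.replicate c.toNat 0)
  let temp := (PySem.List.pyRange 0 h 1).foldl (fun temp y =>
    (PySem.List.pyRange 0 c 1).foldl (fun temp x =>
      let v := pvGet2 area1 y x
      if y - 1 < 0 ∧ x - 1 < 0 then pySet2 temp (y+1) x v
      else if y - 1 < 0 ∧ x + 1 = c then pySet2 temp y (x-1) v
      else if y + 1 = h ∧ x - 1 < 0 then pySet2 temp y (x+1) v
      else if y + 1 = h ∧ x + 1 = c then pySet2 temp (y-1) x v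
      else if y - 1 < 0 then pySet2 temp y (x-1) v
      else if y + 1 = h then pySet2 temp y (x+1) v
      else if x - 1 < 0 then pySet2 temp (y+1) x v
      else if x + 1 = c then pySet2 temp (y-1) x v
      else pySet2 temp y x v) temp) temp0
  pvOverwriteArea temp area1 c

def pvWindArea2 (area2 : List (List Int)) (c : Int) : List (List Int) :=
  let h : Int := (area2.length : Int)
  let temp0 : List (List Int) := List.replicate area2.length (List.replicate c.toNat 0)
  let temp := (PySem.List.pyRange 0 h 1).foldl (fun temp y =>
    (PySem.List.pyRange 0 c 1).foldl (fun temp x =>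
      let v := pvGet2 area2 y x
      if y - 1 < 0 ∧ x - 1 < 0 then pySet2 temp y (x+1) v
      else if y - 1 < 0 ∧ x + 1 = c then pySet2 temp (y+1) x v
      else if y + 1 = h ∧ x - 1 < 0 then pySet2 temp (y-1) x v
      else if y + 1 = h ∧ x + 1 = c then pySet2 temp y (x-1) v
      else if y - 1 < 0 then pySet2 temp y (x+1) v
      else if y + 1 = h then pySet2 temp y (x-1) v
      else if x - 1 < 0 then pySet2 temp (y-1) x v
      else if x + 1 = c then pySet2 temp (y+1) x v
      else pySet2 temp y x v) temp) temp0
  pvOverwriteArea temp area2 c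

def wind_dust (r : Int) (c : Int) (room : List (List Int)) : List (List Int) :=
  let cleaner : Option Int := (PySem.List.pyRange 0 r 1).foldl (fun cy y =>
    match (PySem.List.pyRange 0 c 1).find? (fun x => pvGet2 room y x == -1) with
    | some _ => some y
    | none => cy) none
  match cleaner with
  | none =>
    -- cleaner_y is None: `room[0:None]` and `room[None:]` are full shallow copies ALIASING
    -- the same row objects, so wind_area1's in-place writes are seen by wind_area2 and both
    -- returned halves are the same mutated rows; modelled functionally by sequencing the passes.
    let whole := pvWindArea2 (pvWindArea1 room c) c
    whole ++ whole
  | some k =>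
    pvWindArea1 (PySem.List.slice room (some 0) (some k)) c
      ++ pvWindArea2 (PySem.List.slice room (some k) none) c

-- ===== PORT B =====

def pvUpstream1 (h : Int) (c : Int) (y : Int) (x : Int) : Int × Int :=
  if x = 0 ∧ 0 < y then (y - 1, 0)
  else if y = h - 1 then (y, x - 1)
  else if x = c - 1 then (y + 1, x)
  else if y = 0 then (y, x + 1)
  else (y, x)

def pvUpstream2 (h : Int) (c : Int) (y : Int) (x : Int) : Int × Int :=
  if y = 0 ∧ 0 < x then (0, x - 1)
  else if x = c - 1 then (y - 1, x)
  else if y = h - 1 then (y, x + 1)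
  else if x = 0 then (y + 1, 0)
  else (y, x)

-- Source B `_blow_in_place`: all updates are computed from the unmodified region first and then
-- written back; modelled as a fold that reads `area` (fixed) and writes into the accumulator.
def pvBlow (area : List (List Int)) (c : Int) (up : Int → Int → Int → Int → Int × Int) : List (List Int) :=
  let h : Int := (area.length : Int)
  (PySem.List.pyRange 0 h 1).foldl (fun out y =>
    (PySem.List.pyRange 0 c 1).foldl (fun out x =>
      if pvGet2 area y x ≠ -1 then
        let p := up h c y x
        let v := pvGet2 area p.1 p.2
        pySet2 out y x (if v = -1 then 0 else v)
      else out) out) area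

def wind_dust_alt (r : Int) (c : Int) (room : List (List Int)) : List (List Int) :=
  let cleaner : Option Int := (PySem.List.pyRange 0 r 1).foldl (fun cy y =>
    if (PySem.List.pyRange 0 c 1).any (fun x => pvGet2 room y x == -1) then some y else cy) none
  match cleaner with
  | none =>
    -- cleaner_y is None: Source B's two region slices `room[:None]` / `room[None:]` both alias the
    -- whole grid's rows, so the second in-place pass reads the first's writes and the two
    -- appended regions are the same rows; modelled functionally by sequencing the passes.
    let whole := pvBlow (pvBlow room c pvUpstream1) c pvUpstream2
    whole ++ whole
  | some k =>
    -- purifier row found: the two region slices hold disjoint rows, so each in-place pass is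
    -- independent and the result is the concatenation of the two processed regions.
    pvBlow (PySem.List.slice room none (some k)) c pvUpstream1 ++
      pvBlow (PySem.List.slice room (some k) none) c pvUpstream2

-- ===== PRECONDITION & SPEC =====

-- Pre_ is exactly the set of inputs on which A returns normally, split by how the scan ends:
-- (1) c ≤ 0: no cell is ever read, the grid is returned twice unchanged; (2) the scan completes
-- without finding a -1: both wind passes run over the whole (aliased) grid and it is returned
-- twice; (3) a purifier cell -1 is found in row k, splitting the grid into two regions whose
-- shapes must admit A's border writes (k = 0 or k ≥ 2, at least two rows below, c ≥ 2) —
-- on the other shapes A raises IndexError.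
def Pre_wind_dust (r : Int) (c : Int) (room : List (List Int)) : Prop :=
  c ≤ 0
  ∨ (1 ≤ c ∧ r ≤ (room.length : Int) ∧ (∀ row ∈ room, c ≤ (row.length : Int)) ∧
      (∀ y : Nat, y < r.toNat → ∀ x : Nat, x < c.toNat → (room.getD y []).getD x 0 ≠ -1) ∧
      (room.length = 0 ∨ (2 ≤ room.length ∧ 2 ≤ c)))
  ∨ (2 ≤ c ∧ r ≤ (room.length : Int) ∧ (∀ row ∈ room, c ≤ (row.length : Int)) ∧
      ∃ k : Nat, k < r.toNat ∧ (k = 0 ∨ 2 ≤ k) ∧ k + 2 ≤ room.length ∧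
        (∃ x : Nat, x < c.toNat ∧ (room.getD k []).getD x 0 = -1) ∧
        (∀ j : Nat, j < r.toNat → k < j → ∀ x : Nat, x < c.toNat → (room.getD j []).getD x 0 ≠ -1))

instance (r : Int) (c : Int) (room : List (List Int)) : Decidable (Pre_wind_dust r c room) := by
  unfold Pre_wind_dust; infer_instance

def pvWitness_wind_dust : Int × Int × List (List Int) := (2, 2, [[-1, 0], [0, 0]])

def Spec_wind_dust (r : Int) (c : Int) (room : List (List Int)) (out : List (List Int)) : Prop := out = wind_dust_alt r c room
instance (r : Int) (c : Int) (room : List (List Int)) (out : List (List Int)) : Decidable (Spec_wind_dust r c room out) := by unfold Spec_wind_dust; infer_instance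

-- ===== CLAIM (what is proved, stated in full; the proofs are below) =====
def Claim_equal_wind_dust : Prop := ∀ (r : Int) (c : Int) (room : List (List Int)), Dom_wind_dust r c room → Pre_wind_dust r c room → Spec_wind_dust r c room (wind_dust r c room)

-- ===== LEMMAS AND PROOFS =====

-- Nat-indexed view of a grid and of single-cell assignment.
def pvG (g : List (List Int)) (y : Nat) (x : Nat) : Int := (g.getD y []).getD x 0
def pvS (g : List (List Int)) (p : Nat × Nat) (v : Int) : List (List Int) :=
  g.modify p.1 (fun row => row.set p.2 v)
def pvCells (H : Nat) (C : Nat) : List (Nat × Nat) :=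
  (List.range H).flatMap (fun y => (List.range C).map (fun x => (y, x)))

-- destination map of A's scatter loops and its inverse (B's upstream maps), Nat side
def pvD1 (H : Nat) (C : Nat) (p : Nat × Nat) : Nat × Nat :=
  let y := p.1; let x := p.2
  if y = 0 ∧ x = 0 then (y+1, x)
  else if y = 0 ∧ x + 1 = C then (y, x-1)
  else if y + 1 = H ∧ x = 0 then (y, x+1)
  else if y + 1 = H ∧ x + 1 = C then (y-1, x)
  else if y = 0 then (y, x-1)
  else if y + 1 = H then (y, x+1)
  else if x = 0 then (y+1, x)
  else if x + 1 = C then (y-1, x)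
  else (y, x)

def pvI1 (H : Nat) (C : Nat) (p : Nat × Nat) : Nat × Nat :=
  let y := p.1; let x := p.2
  if x = 0 ∧ 0 < y then (y-1, 0)
  else if y + 1 = H then (y, x-1)
  else if x + 1 = C then (y+1, x)
  else if y = 0 then (y, x+1)
  else (y, x)

def pvD2 (H : Nat) (C : Nat) (p : Nat × Nat) : Nat × Nat :=
  let y := p.1; let x := p.2
  if y = 0 ∧ x = 0 then (y, x+1)
  else if y = 0 ∧ x + 1 = C then (y+1, x)
  else if y + 1 = H ∧ x = 0 then (y-1, x)
  else if y + 1 = H ∧ x + 1 = C then (y, x-1)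
  else if y = 0 then (y, x+1)
  else if y + 1 = H then (y, x-1)
  else if x = 0 then (y-1, x)
  else if x + 1 = C then (y+1, x)
  else (y, x)

def pvI2 (H : Nat) (C : Nat) (p : Nat × Nat) : Nat × Nat :=
  let y := p.1; let x := p.2
  if y = 0 ∧ 0 < x then (0, x-1)
  else if x + 1 = C then (y-1, x)
  else if y + 1 = H then (y, x+1)
  else if x = 0 then (y+1, 0)
  else (y, x)

-- generic: fold congruence under an invariant of the accumulator
theorem pvFoldlCongrInv {α β : Type} (Inv : β → Prop) (f g : β → α → β) (L : List α) (s0 : β)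
    (h0 : Inv s0) (hstep : ∀ s a, Inv s → a ∈ L → f s a = g s a ∧ Inv (g s a)) :
    L.foldl f s0 = L.foldl g s0 := by
  induction L generalizing s0 with
  | nil => rfl
  | cons a L ih =>
    simp only [List.foldl_cons]
    have h := hstep s0 a h0 (by simp)
    rw [h.1]
    exact ih (g s0 a) h.2 (fun s b hs hb => hstep s b hs (by simp [hb]))

theorem pvG_natCast (g : List (List Int)) (y x : Nat) : pvGet2 g (y : Int) (x : Int) = pvG g y x := by
  simp [pvGet2, pvG, PySem.List.pyGetD_natCast]

theorem pvG_eq_opt (g : List (List Int)) (y x : Nat) : pvG g y x = ((g[y]?.getD [])[x]?).getD 0 := by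
  simp [pvG, List.getD_eq_getElem?_getD]

theorem length_pvS (g : List (List Int)) (p : Nat × Nat) (v : Int) : (pvS g p v).length = g.length := by
  simp [pvS]

theorem row_pvS (g : List (List Int)) (p : Nat × Nat) (v : Int) (i : Nat) :
    (pvS g p v)[i]? = if p.1 = i then (List.set · p.2 v) <$> g[i]? else g[i]? := by
  simp [pvS, List.getElem?_modify]
  split <;> cases g[i]? <;> simp

theorem rowlen_pvS (g : List (List Int)) (p : Nat × Nat) (v : Int) (i : Nat) :
    ((pvS g p v).getD i []).length = (g.getD i []).length := by
  rw [List.getD_eq_getElem?_getD, List.getD_eq_getElem?_getD, row_pvS]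
  split <;> cases g[i]? <;> simp

theorem pvG_pvS_self (g : List (List Int)) (p : Nat × Nat) (v : Int)
    (h1 : p.1 < g.length) (h2 : p.2 < (g.getD p.1 []).length) :
    pvG (pvS g p v) p.1 p.2 = v := by
  rw [pvG_eq_opt, row_pvS, if_pos rfl]
  rw [List.getD_eq_getElem?_getD] at h2
  rcases hrow : g[p.1]? with _ | row
  · rw [List.getElem?_eq_none_iff] at hrow; omega
  · rw [hrow] at h2
    simp only [Option.map_eq_map, Option.map_some, Option.getD_some]
    simp only [Option.getD_some] at h2
    rw [List.getElem?_set, if_pos rfl, if_pos h2]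
    rfl

theorem pvG_pvS_ne (g : List (List Int)) (p q : Nat × Nat) (v : Int) (h : q ≠ p) :
    pvG (pvS g p v) q.1 q.2 = pvG g q.1 q.2 := by
  rw [pvG_eq_opt, pvG_eq_opt, row_pvS]
  by_cases h1 : p.1 = q.1
  · rw [if_pos h1]
    have h2 : p.2 ≠ q.2 := fun h2 => h (by rcases p with ⟨a,b⟩; rcases q with ⟨a',b'⟩; simp_all)
    cases g[q.1]? <;> simp [h2]
  · rw [if_neg h1]

-- ===== cells list =====
theorem mem_pvCells (H C : Nat) (p : Nat × Nat) : p ∈ pvCells H C ↔ p.1 < H ∧ p.2 < C := by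
  rcases p with ⟨y, x⟩
  simp only [pvCells, List.mem_flatMap, List.mem_map, List.mem_range]
  constructor
  · rintro ⟨a, ha, b, hb, he⟩
    rw [Prod.mk.injEq] at he
    exact ⟨he.1 ▸ ha, he.2 ▸ hb⟩
  · rintro ⟨hy, hx⟩; exact ⟨y, hy, ⟨x, hx, rfl⟩⟩

theorem nodup_pvCells (H C : Nat) : (pvCells H C).Nodup := by
  unfold pvCells
  rw [List.nodup_flatMap]
  constructor
  · intro y _; exact (List.nodup_range).map (fun a b => by simp)
  · refine List.Pairwise.imp ?_ (List.pairwise_lt_range (n := H))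
    intro a b hab p hp hq
    simp only [List.mem_map, List.mem_range] at hp hq
    rcases hp with ⟨x1, -, rfl⟩
    rcases hq with ⟨x2, -, he⟩
    rw [Prod.mk.injEq] at he
    omega

theorem nested_foldl_eq_cells {β : Type} (f : β → Int → Int → β) (H C : Nat) (s0 : β) :
    (PySem.List.pyRange 0 (H : Int) 1).foldl (fun s y =>
      (PySem.List.pyRange 0 (C : Int) 1).foldl (fun s x => f s y x) s) s0
    = (pvCells H C).foldl (fun s p => f s (p.1 : Int) (p.2 : Int)) s0 := by
  simp [PySem.List.pyRange_one, List.foldl_map, pvCells, List.foldl_flatMap]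
-- dims of a grid: outer length and every row's length (getD-based, total)
def pvDims (g : List (List Int)) (H : Nat) (W : Nat → Nat) : Prop :=
  g.length = H ∧ ∀ i : Nat, i < H → (g.getD i []).length = W i

theorem pvDims_pvS (g : List (List Int)) (H : Nat) (W : Nat → Nat) (p : Nat × Nat) (v : Int)
    (h : pvDims g H W) : pvDims (pvS g p v) H W := by
  exact ⟨by rw [length_pvS, h.1], fun i hi => by rw [rowlen_pvS]; exact h.2 i hi⟩

-- scatter fold: every step writes value (w q) to cell (d q); inv inverts d on L
theorem pvScatterFold (L : List (Nat × Nat)) (d inv : Nat × Nat → Nat × Nat)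
    (w : Nat × Nat → Int) (t0 : List (List Int)) (H : Nat) (W : Nat → Nat)
    (hdims : pvDims t0 H W)
    (hinv : ∀ q ∈ L, inv (d q) = q)
    (hr : ∀ q ∈ L, (d q).1 < H ∧ (d q).2 < W (d q).1)
    (p : Nat × Nat) :
    pvG (L.foldl (fun t q => pvS t (d q) (w q)) t0) p.1 p.2
      = if inv p ∈ L ∧ d (inv p) = p then w (inv p) else pvG t0 p.1 p.2 := by
  induction L generalizing t0 with
  | nil => simp
  | cons q L ih =>
    simp only [List.foldl_cons]
    rw [ih (pvS t0 (d q) (w q)) (pvDims_pvS _ _ _ _ _ hdims)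
      (fun a ha => hinv a (by simp [ha])) (fun a ha => hr a (by simp [ha]))]
    by_cases hmem : inv p ∈ L ∧ d (inv p) = p
    · rw [if_pos hmem, if_pos ⟨by simp [hmem.1], hmem.2⟩]
    · rw [if_neg hmem]
      by_cases hpq : p = d q
      · have hq := hinv q (by simp)
        have : inv p = q := by rw [hpq, hq]
        rw [if_pos ⟨by simp [this], by rw [this, ← hpq]⟩, this, hpq]
        exact pvG_pvS_self _ _ _ ((hr q (by simp)).1.trans_eq hdims.1.symm)
          (by rw [hdims.2 _ (hr q (by simp)).1]; exact (hr q (by simp)).2)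
      · rw [pvG_pvS_ne _ _ _ _ hpq]
        rw [if_neg ?_]
        rintro ⟨hmem', hd'⟩
        rcases List.mem_cons.mp hmem' with h | h
        · exact hpq (by rw [← hd', h])
        · exact hmem ⟨h, hd'⟩

theorem pvDims_foldl_pvS {α : Type} (L : List α) (d : α → Nat × Nat) (w : α → Int)
    (t0 : List (List Int)) (H : Nat) (W : Nat → Nat) (hdims : pvDims t0 H W) :
    pvDims (L.foldl (fun t q => pvS t (d q) (w q)) t0) H W := by
  induction L generalizing t0 with
  | nil => exact hdims
  | cons q L ih => exact ih _ (pvDims_pvS _ _ _ _ _ hdims)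

-- per-cell update fold with an evolving self-read: each listed cell is visited once,
-- the step reads the grid only at its own cell
theorem pvMapFold (L : List (Nat × Nat)) (V : Nat × Nat → Int) (t0 : List (List Int))
    (H : Nat) (W : Nat → Nat) (hdims : pvDims t0 H W) (hnd : L.Nodup)
    (hr : ∀ q ∈ L, q.1 < H ∧ q.2 < W q.1) (p : Nat × Nat) :
    pvG (L.foldl (fun t q => if pvG t q.1 q.2 ≠ -1 then pvS t q (V q) else t) t0) p.1 p.2
      = if p ∈ L then (if pvG t0 p.1 p.2 ≠ -1 then V p else pvG t0 p.1 p.2)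
        else pvG t0 p.1 p.2 := by
  induction L generalizing t0 with
  | nil => simp
  | cons q L ih =>
    simp only [List.foldl_cons]
    have hstep : ∀ t1 : List (List Int), pvDims t1 H W →
        pvDims (if pvG t1 q.1 q.2 ≠ -1 then pvS t1 q (V q) else t1) H W := by
      intro t1 h1; split
      · exact pvDims_pvS _ _ _ _ _ h1
      · exact h1
    rw [ih _ (hstep t0 hdims) (List.Nodup.of_cons hnd) (fun a ha => hr a (by simp [ha]))]
    by_cases hpq : p = q
    · subst hpq
      have hpL : p ∉ L := (List.nodup_cons.mp hnd).1
      rw [if_neg hpL, if_pos (List.mem_cons_self ..)]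
      by_cases hv : pvG t0 p.1 p.2 ≠ -1
      · simp only [if_pos hv]
        exact pvG_pvS_self _ _ _ ((hr p (by simp)).1.trans_eq hdims.1.symm)
          (by rw [hdims.2 _ (hr p (by simp)).1]; exact (hr p (by simp)).2)
      · simp only [if_neg hv]
    · have ht1 : pvG (if pvG t0 q.1 q.2 ≠ -1 then pvS t0 q (V q) else t0) p.1 p.2
          = pvG t0 p.1 p.2 := by
        split
        · exact pvG_pvS_ne _ _ _ _ hpq
        · rfl
      rw [ht1]
      by_cases hpL : p ∈ L
      · simp [hpL]
      · rw [if_neg hpL, if_neg (by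
          intro h
          rcases List.mem_cons.mp h with h | h
          · exact hpq h
          · exact hpL h)]

-- per-cell update fold reading only fixed data (B's gather pass)
theorem pvMapFoldFixed (L : List (Nat × Nat)) (P : Nat × Nat → Bool) (V : Nat × Nat → Int)
    (t0 : List (List Int)) (p : Nat × Nat) (hnd : L.Nodup)
    (hpin : p ∈ L → P p = true → p.1 < t0.length ∧ p.2 < (t0.getD p.1 []).length) :
    pvG (L.foldl (fun t q => if P q then pvS t q (V q) else t) t0) p.1 p.2
      = if p ∈ L ∧ P p then V p else pvG t0 p.1 p.2 := by
  induction L generalizing t0 with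
  | nil => simp
  | cons q L ih =>
    simp only [List.foldl_cons]
    have hlen1 : (if P q then pvS t0 q (V q) else t0).length = t0.length := by
      split
      · exact length_pvS _ _ _
      · rfl
    have hrow1 : ∀ i, ((if P q then pvS t0 q (V q) else t0).getD i []).length
        = (t0.getD i []).length := by
      intro i; split
      · exact rowlen_pvS _ _ _ _
      · rfl
    rw [ih _ (List.Nodup.of_cons hnd)
      (fun hp hP => by
        rw [hlen1, hrow1]
        exact hpin (List.mem_cons_of_mem _ hp) hP)]
    by_cases hpq : p = q
    · subst hpq
      have hpL : p ∉ L := (List.nodup_cons.mp hnd).1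
      rw [if_neg (by rintro ⟨h, -⟩; exact hpL h)]
      by_cases hP : P p = true
      · simp only [if_pos hP]
        rw [if_pos ⟨List.mem_cons_self .., hP⟩]
        exact pvG_pvS_self _ _ _ (hpin (by simp) hP).1 (hpin (by simp) hP).2
      · simp only [if_neg hP]
        rw [if_neg (by rintro ⟨-, h⟩; exact hP h)]
    · have ht1 : pvG (if P q then pvS t0 q (V q) else t0) p.1 p.2 = pvG t0 p.1 p.2 := by
        split
        · exact pvG_pvS_ne _ _ _ _ hpq
        · rfl
      rw [ht1]
      by_cases hpL : p ∈ L
      · simp [hpL]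
      · rw [if_neg (by rintro ⟨h, -⟩; exact hpL h), if_neg (by
          rintro ⟨h, -⟩
          rcases List.mem_cons.mp h with h | h
          · exact hpq h
          · exact hpL h)]

-- an invariant carried through a fold
theorem pvFoldlInv {α β : Type} (Inv : β → Prop) (f : β → α → β) (L : List α) (s0 : β)
    (h0 : Inv s0) (hstep : ∀ s a, a ∈ L → Inv s → Inv (f s a)) : Inv (L.foldl f s0) := by
  induction L generalizing s0 with
  | nil => exact h0
  | cons a L ih =>
    exact ih (f s0 a) (hstep s0 a (by simp) h0) (fun s b hb hs => hstep s b (by simp [hb]) hs)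
-- ring bookkeeping: pvD* is in range and pvI* inverts it (2 ≤ H, 2 ≤ C)
theorem pvD1_range (H C : Nat) (hH : 2 ≤ H) (hC : 2 ≤ C) (q : Nat × Nat)
    (h1 : q.1 < H) (h2 : q.2 < C) : (pvD1 H C q).1 < H ∧ (pvD1 H C q).2 < C := by
  rcases q with ⟨y, x⟩
  simp only [pvD1]
  split_ifs <;> simp_all <;> omega

theorem pvI1_range (H C : Nat) (q : Nat × Nat)
    (h1 : q.1 < H) (h2 : q.2 < C) : (pvI1 H C q).1 < H ∧ (pvI1 H C q).2 < C := by
  rcases q with ⟨y, x⟩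
  simp only [pvI1]
  split_ifs <;> simp_all <;> omega

theorem pvI1_D1 (H C : Nat) (hH : 2 ≤ H) (hC : 2 ≤ C) (q : Nat × Nat)
    (h1 : q.1 < H) (h2 : q.2 < C) : pvI1 H C (pvD1 H C q) = q := by
  rcases q with ⟨y, x⟩
  simp only [pvD1]
  split_ifs <;> simp only [pvI1] <;> split_ifs <;> simp_all [Prod.mk.injEq] <;> omega

theorem pvD1_I1 (H C : Nat) (hH : 2 ≤ H) (hC : 2 ≤ C) (p : Nat × Nat)
    (h1 : p.1 < H) (h2 : p.2 < C) : pvD1 H C (pvI1 H C p) = p := by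
  rcases p with ⟨y, x⟩
  simp only [pvI1]
  split_ifs <;> simp only [pvD1] <;> split_ifs <;> simp_all [Prod.mk.injEq] <;> omega

theorem pvD2_range (H C : Nat) (hH : 2 ≤ H) (hC : 2 ≤ C) (q : Nat × Nat)
    (h1 : q.1 < H) (h2 : q.2 < C) : (pvD2 H C q).1 < H ∧ (pvD2 H C q).2 < C := by
  rcases q with ⟨y, x⟩
  simp only [pvD2]
  split_ifs <;> simp_all <;> omega

theorem pvI2_range (H C : Nat) (q : Nat × Nat)
    (h1 : q.1 < H) (h2 : q.2 < C) : (pvI2 H C q).1 < H ∧ (pvI2 H C q).2 < C := by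
  rcases q with ⟨y, x⟩
  simp only [pvI2]
  split_ifs <;> simp_all <;> omega

theorem pvI2_D2 (H C : Nat) (hH : 2 ≤ H) (hC : 2 ≤ C) (q : Nat × Nat)
    (h1 : q.1 < H) (h2 : q.2 < C) : pvI2 H C (pvD2 H C q) = q := by
  rcases q with ⟨y, x⟩
  simp only [pvD2]
  split_ifs <;> simp only [pvI2] <;> split_ifs <;> simp_all [Prod.mk.injEq] <;> omega

theorem pvD2_I2 (H C : Nat) (hH : 2 ≤ H) (hC : 2 ≤ C) (p : Nat × Nat)
    (h1 : p.1 < H) (h2 : p.2 < C) : pvD2 H C (pvI2 H C p) = p := by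
  rcases p with ⟨y, x⟩
  simp only [pvI2]
  split_ifs <;> simp only [pvD2] <;> split_ifs <;> simp_all [Prod.mk.injEq] <;> omega

-- B's Int-level upstream maps agree with the Nat-level inverses
theorem pvUpstream1_cast (H C : Nat) (hH : 2 ≤ H) (hC : 2 ≤ C) (y x : Nat)
    (hy : y < H) (hx : x < C) :
    pvUpstream1 (H : Int) (C : Int) (y : Int) (x : Int)
      = (((pvI1 H C (y, x)).1 : Int), ((pvI1 H C (y, x)).2 : Int)) := by
  simp only [pvUpstream1, pvI1]
  split_ifs <;> simp_all [Prod.mk.injEq] <;> omega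

theorem pvUpstream2_cast (H C : Nat) (hH : 2 ≤ H) (hC : 2 ≤ C) (y x : Nat)
    (hy : y < H) (hx : x < C) :
    pvUpstream2 (H : Int) (C : Int) (y : Int) (x : Int)
      = (((pvI2 H C (y, x)).1 : Int), ((pvI2 H C (y, x)).2 : Int)) := by
  simp only [pvUpstream2, pvI2]
  split_ifs <;> simp_all [Prod.mk.injEq] <;> omega
theorem pySet1_natCast (row : List Int) (x : Nat) (v : Int) :
    pySet1 row (x : Int) v = row.set x v := by
  unfold pySet1
  have h0 : ¬((x : Int) < 0) := by omega
  simp only [if_neg h0]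
  split_ifs with h
  · simp
  · rw [List.set_eq_of_length_le (by omega)]

theorem pySet2_cast (g : List (List Int)) (ia ib : Int) (a b : Nat) (v : Int)
    (hia : ia = (a : Int)) (hib : ib = (b : Int)) (ha : a < g.length) :
    pySet2 g ia ib v = pvS g (a, b) v := by
  subst hia hib
  unfold pySet2 pvS
  have h0 : ¬((a : Int) < 0) := by omega
  simp only [if_neg h0]
  rw [if_pos (by constructor <;> omega)]
  simp only [Int.toNat_natCast]
  congr 1
  funext row
  exact pySet1_natCast row b v

-- A's 9-way scatter branch equals a single write to pvD1/pvD2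
set_option maxHeartbeats 2000000 in
theorem pvCascade1 (temp : List (List Int)) (c : Int) (H C : Nat)
    (hc : c = (C : Int)) (hH : 2 ≤ H) (hC : 2 ≤ C)
    (hdims : pvDims temp H (fun _ => C)) (y x : Nat) (hy : y < H) (hx : x < C) (v : Int) :
    (if (y : Int) - 1 < 0 ∧ (x : Int) - 1 < 0 then pySet2 temp ((y : Int)+1) (x : Int) v
     else if (y : Int) - 1 < 0 ∧ (x : Int) + 1 = c then pySet2 temp (y : Int) ((x : Int)-1) v
     else if (y : Int) + 1 = (H : Int) ∧ (x : Int) - 1 < 0 then pySet2 temp (y : Int) ((x : Int)+1) v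
     else if (y : Int) + 1 = (H : Int) ∧ (x : Int) + 1 = c then pySet2 temp ((y : Int)-1) (x : Int) v
     else if (y : Int) - 1 < 0 then pySet2 temp (y : Int) ((x : Int)-1) v
     else if (y : Int) + 1 = (H : Int) then pySet2 temp (y : Int) ((x : Int)+1) v
     else if (x : Int) - 1 < 0 then pySet2 temp ((y : Int)+1) (x : Int) v
     else if (x : Int) + 1 = c then pySet2 temp ((y : Int)-1) (x : Int) v
     else pySet2 temp (y : Int) (x : Int) v)
    = pvS temp (pvD1 H C (y, x)) v := by
  subst hc
  have hlen : temp.length = H := hdims.1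
  dsimp only [pvD1]
  split_ifs <;>
    first
      | omega
      | (apply pySet2_cast <;> (push_cast; omega))

set_option maxHeartbeats 2000000 in
theorem pvCascade2 (temp : List (List Int)) (c : Int) (H C : Nat)
    (hc : c = (C : Int)) (hH : 2 ≤ H) (hC : 2 ≤ C)
    (hdims : pvDims temp H (fun _ => C)) (y x : Nat) (hy : y < H) (hx : x < C) (v : Int) :
    (if (y : Int) - 1 < 0 ∧ (x : Int) - 1 < 0 then pySet2 temp (y : Int) ((x : Int)+1) v
     else if (y : Int) - 1 < 0 ∧ (x : Int) + 1 = c then pySet2 temp ((y : Int)+1) (x : Int) v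
     else if (y : Int) + 1 = (H : Int) ∧ (x : Int) - 1 < 0 then pySet2 temp ((y : Int)-1) (x : Int) v
     else if (y : Int) + 1 = (H : Int) ∧ (x : Int) + 1 = c then pySet2 temp (y : Int) ((x : Int)-1) v
     else if (y : Int) - 1 < 0 then pySet2 temp (y : Int) ((x : Int)+1) v
     else if (y : Int) + 1 = (H : Int) then pySet2 temp (y : Int) ((x : Int)-1) v
     else if (x : Int) - 1 < 0 then pySet2 temp ((y : Int)-1) (x : Int) v
     else if (x : Int) + 1 = c then pySet2 temp ((y : Int)+1) (x : Int) v
     else pySet2 temp (y : Int) (x : Int) v)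
    = pvS temp (pvD2 H C (y, x)) v := by
  subst hc
  have hlen : temp.length = H := hdims.1
  dsimp only [pvD2]
  split_ifs <;>
    first
      | omega
      | (apply pySet2_cast <;> (push_cast; omega))
theorem pvGridExt (g1 g2 : List (List Int)) (hl : g1.length = g2.length)
    (hw : ∀ i, i < g1.length → (g1.getD i []).length = (g2.getD i []).length)
    (hg : ∀ y x, pvG g1 y x = pvG g2 y x) : g1 = g2 := by
  apply List.ext_getElem hl
  intro y hy1 hy2
  apply List.ext_getElem
    (by rw [← List.getD_eq_getElem g1 [] hy1, ← List.getD_eq_getElem g2 [] hy2]; exact hw y hy1)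
  intro x hx1 hx2
  have h := hg y x
  rw [pvG, pvG, List.getD_eq_getElem _ _ hy1, List.getD_eq_getElem _ _ hy2,
    List.getD_eq_getElem _ _ hx1, List.getD_eq_getElem _ _ hx2] at h
  exact h
set_option maxHeartbeats 2000000 in
theorem pvRegion1 (area : List (List Int)) (c : Int) (C : Nat) (hc : c = (C : Int)) (hC : 2 ≤ C)
    (hrows : ∀ row ∈ area, C ≤ row.length) (hHor : area.length = 0 ∨ 2 ≤ area.length) :
    pvWindArea1 area c = pvBlow area c pvUpstream1 := by
  subst hc
  rcases hHor with hH0 | hH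
  · rw [List.length_eq_zero_iff] at hH0
    subst hH0
    simp [pvWindArea1, pvBlow, pvOverwriteArea, PySem.List.pyRange_one]
  · have hWa : ∀ i, i < area.length → C ≤ (area.getD i []).length := by
      intro i hi
      refine hrows _ ?_
      rw [List.getD_eq_getElem _ _ hi]
      exact List.getElem_mem _
    -- ===== the scatter pass of A =====
    have e1 : pvWindArea1 area (C : Int) = pvOverwriteArea
        ((pvCells area.length C).foldl
          (fun t q => pvS t (pvD1 area.length C q) (pvG area q.1 q.2))
          (List.replicate area.length (List.replicate C 0))) area (C : Int) := by
      simp only [pvWindArea1]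
      congr 1
      rw [show ((C : Int)).toNat = C from by simp]
      rw [nested_foldl_eq_cells]
      refine pvFoldlCongrInv (fun t => pvDims t area.length (fun _ => C)) _ _ _ _
        ⟨by simp, fun i hi => by simp [hi]⟩ ?_
      intro s q hs hq
      rw [mem_pvCells] at hq
      constructor
      · rw [pvG_natCast]
        exact pvCascade1 s (C : Int) area.length C rfl hH hC hs q.1 q.2 hq.1 hq.2 _
      · exact pvDims_pvS _ _ _ _ _ hs
    set tempF := (pvCells area.length C).foldl
        (fun t q => pvS t (pvD1 area.length C q) (pvG area q.1 q.2))
        (List.replicate area.length (List.replicate C 0)) with htempF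
    have htFdims : pvDims tempF area.length (fun _ => C) :=
      pvDims_foldl_pvS _ _ _ _ _ _ ⟨by simp, fun i hi => by simp [hi]⟩
    have htF : ∀ p : Nat × Nat, p.1 < area.length → p.2 < C →
        pvG tempF p.1 p.2 = pvG area (pvI1 area.length C p).1 (pvI1 area.length C p).2 := by
      intro p h1 h2
      rw [htempF, pvScatterFold _ _ (pvI1 area.length C) _ _ area.length (fun _ => C)
        ⟨by simp, fun i hi => by simp [hi]⟩
        (fun q hq => pvI1_D1 area.length C hH hC q ((mem_pvCells _ _ _).mp hq).1 ((mem_pvCells _ _ _).mp hq).2)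
        (fun q hq => pvD1_range area.length C hH hC q ((mem_pvCells _ _ _).mp hq).1 ((mem_pvCells _ _ _).mp hq).2)]
      rw [if_pos ⟨(mem_pvCells _ _ _).mpr (pvI1_range area.length C p h1 h2), pvD1_I1 area.length C hH hC p h1 h2⟩]
    -- ===== A's overwrite pass, normalized =====
    have e2 : pvOverwriteArea tempF area (C : Int) = (pvCells area.length C).foldl
        (fun t q => if pvG t q.1 q.2 ≠ -1 then
          pvS t q (if pvG tempF q.1 q.2 = -1 then 0 else pvG tempF q.1 q.2) else t) area := by
      simp only [pvOverwriteArea]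
      rw [nested_foldl_eq_cells]
      refine pvFoldlCongrInv (fun t => pvDims t area.length (fun i => (area.getD i []).length)) _ _ _ _
        ⟨rfl, fun i hi => rfl⟩ ?_
      intro s q hs hq
      rw [mem_pvCells] at hq
      have hset : ∀ v : Int, pySet2 s (q.1 : Int) (q.2 : Int) v = pvS s q v := by
        intro v
        have := pySet2_cast s (q.1 : Int) (q.2 : Int) q.1 q.2 v rfl rfl (by have := hs.1; omega)
        simpa using this
      constructor
      · rw [pvG_natCast, pvG_natCast]
        by_cases hv : pvG s q.1 q.2 ≠ -1
        · rw [if_pos hv, if_pos hv]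
          by_cases ht : pvG tempF q.1 q.2 = -1
          · rw [if_pos ht, if_pos ht, hset]
          · rw [if_neg ht, if_neg ht, hset]
        · rw [if_neg hv, if_neg hv]
      · split
        · exact pvDims_pvS _ _ _ _ _ hs
        · exact hs
    -- ===== B, normalized =====
    have e3 : pvBlow area (C : Int) pvUpstream1 = (pvCells area.length C).foldl
        (fun t q => if decide (pvG area q.1 q.2 ≠ -1) then
          pvS t q (if pvG area (pvI1 area.length C q).1 (pvI1 area.length C q).2 = -1 then 0
            else pvG area (pvI1 area.length C q).1 (pvI1 area.length C q).2) else t) area := by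
      simp only [pvBlow]
      rw [nested_foldl_eq_cells]
      refine pvFoldlCongrInv (fun t => pvDims t area.length (fun i => (area.getD i []).length)) _ _ _ _
        ⟨rfl, fun i hi => rfl⟩ ?_
      intro s q hs hq
      rw [mem_pvCells] at hq
      have hset : ∀ v : Int, pySet2 s (q.1 : Int) (q.2 : Int) v = pvS s q v := by
        intro v
        have := pySet2_cast s (q.1 : Int) (q.2 : Int) q.1 q.2 v rfl rfl (by have := hs.1; omega)
        simpa using this
      have hup : pvUpstream1 ((area.length : Nat) : Int) ((C : Nat) : Int) (q.1 : Int) (q.2 : Int)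
          = (((pvI1 area.length C q).1 : Int), ((pvI1 area.length C q).2 : Int)) := by
        have := pvUpstream1_cast area.length C hH hC q.1 q.2 hq.1 hq.2
        simpa using this
      constructor
      · simp only [hup, pvG_natCast]
        rw [hset]
        by_cases hv : pvG area q.1 q.2 ≠ -1
        · rw [if_pos hv, if_pos (decide_eq_true_iff.mpr hv)]
        · rw [if_neg hv, if_neg (by rw [decide_eq_true_iff]; exact hv)]
      · split
        · exact pvDims_pvS _ _ _ _ _ hs
        · exact hs
    -- ===== compare pointwise =====
    rw [e1, e2, e3]
    have hbase : pvDims area area.length (fun i => (area.getD i []).length) :=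
      ⟨rfl, fun i hi => rfl⟩
    have hdimsA := pvFoldlInv (fun t => pvDims t area.length (fun i => (area.getD i []).length))
      (fun t q => if pvG t q.1 q.2 ≠ -1 then
          pvS t q (if pvG tempF q.1 q.2 = -1 then 0 else pvG tempF q.1 q.2) else t)
      (pvCells area.length C) area hbase
      (fun s q hq hs => by
        dsimp only
        split
        · exact pvDims_pvS _ _ _ _ _ hs
        · exact hs)
    have hdimsB := pvFoldlInv (fun t => pvDims t area.length (fun i => (area.getD i []).length))
      (fun t q => if decide (pvG area q.1 q.2 ≠ -1) then
          pvS t q (if pvG area (pvI1 area.length C q).1 (pvI1 area.length C q).2 = -1 then 0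
            else pvG area (pvI1 area.length C q).1 (pvI1 area.length C q).2) else t)
      (pvCells area.length C) area hbase
      (fun s q hq hs => by
        dsimp only
        split
        · exact pvDims_pvS _ _ _ _ _ hs
        · exact hs)
    refine pvGridExt _ _ (by rw [hdimsA.1, hdimsB.1]) ?_ ?_
    · intro i hi
      rw [hdimsA.1] at hi
      rw [hdimsA.2 i hi, hdimsB.2 i hi]
    · intro y x
      rw [pvMapFold (pvCells area.length C)
        (fun q => if pvG tempF q.1 q.2 = -1 then 0 else pvG tempF q.1 q.2)
        area area.length (fun i => (area.getD i []).length)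
        hbase (nodup_pvCells _ _)
        (fun q hq => ⟨((mem_pvCells _ _ _).mp hq).1,
          lt_of_lt_of_le ((mem_pvCells _ _ _).mp hq).2 (hWa _ ((mem_pvCells _ _ _).mp hq).1)⟩) (y, x)]
      rw [pvMapFoldFixed (pvCells area.length C)
        (fun q => decide (pvG area q.1 q.2 ≠ -1))
        (fun q => if pvG area (pvI1 area.length C q).1 (pvI1 area.length C q).2 = -1 then 0
            else pvG area (pvI1 area.length C q).1 (pvI1 area.length C q).2)
        area (y, x) (nodup_pvCells _ _)
        (fun hm _ => ⟨((mem_pvCells _ _ _).mp hm).1,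
          lt_of_lt_of_le ((mem_pvCells _ _ _).mp hm).2 (hWa _ ((mem_pvCells _ _ _).mp hm).1)⟩)]
      by_cases hm : (y, x) ∈ pvCells area.length C
      · have hyx := (mem_pvCells _ _ _).mp hm
        have hS := htF (y, x) hyx.1 hyx.2
        by_cases hv : pvG area y x ≠ -1
        · simp [hm, hv, hS]
        · simp [hm, hv]
      · simp [hm]
set_option maxHeartbeats 2000000 in
theorem pvRegion2 (area : List (List Int)) (c : Int) (C : Nat) (hc : c = (C : Int)) (hC : 2 ≤ C)
    (hrows : ∀ row ∈ area, C ≤ row.length) (hHor : area.length = 0 ∨ 2 ≤ area.length) :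
    pvWindArea2 area c = pvBlow area c pvUpstream2 := by
  subst hc
  rcases hHor with hH0 | hH
  · rw [List.length_eq_zero_iff] at hH0
    subst hH0
    simp [pvWindArea2, pvBlow, pvOverwriteArea, PySem.List.pyRange_one]
  · have hWa : ∀ i, i < area.length → C ≤ (area.getD i []).length := by
      intro i hi
      refine hrows _ ?_
      rw [List.getD_eq_getElem _ _ hi]
      exact List.getElem_mem _
    -- ===== the scatter pass of A =====
    have e1 : pvWindArea2 area (C : Int) = pvOverwriteArea
        ((pvCells area.length C).foldl
          (fun t q => pvS t (pvD2 area.length C q) (pvG area q.1 q.2))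
          (List.replicate area.length (List.replicate C 0))) area (C : Int) := by
      simp only [pvWindArea2]
      congr 1
      rw [show ((C : Int)).toNat = C from by simp]
      rw [nested_foldl_eq_cells]
      refine pvFoldlCongrInv (fun t => pvDims t area.length (fun _ => C)) _ _ _ _
        ⟨by simp, fun i hi => by simp [hi]⟩ ?_
      intro s q hs hq
      rw [mem_pvCells] at hq
      constructor
      · rw [pvG_natCast]
        exact pvCascade2 s (C : Int) area.length C rfl hH hC hs q.1 q.2 hq.1 hq.2 _
      · exact pvDims_pvS _ _ _ _ _ hs
    set tempF := (pvCells area.length C).foldl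
        (fun t q => pvS t (pvD2 area.length C q) (pvG area q.1 q.2))
        (List.replicate area.length (List.replicate C 0)) with htempF
    have htFdims : pvDims tempF area.length (fun _ => C) :=
      pvDims_foldl_pvS _ _ _ _ _ _ ⟨by simp, fun i hi => by simp [hi]⟩
    have htF : ∀ p : Nat × Nat, p.1 < area.length → p.2 < C →
        pvG tempF p.1 p.2 = pvG area (pvI2 area.length C p).1 (pvI2 area.length C p).2 := by
      intro p h1 h2
      rw [htempF, pvScatterFold _ _ (pvI2 area.length C) _ _ area.length (fun _ => C)
        ⟨by simp, fun i hi => by simp [hi]⟩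
        (fun q hq => pvI2_D2 area.length C hH hC q ((mem_pvCells _ _ _).mp hq).1 ((mem_pvCells _ _ _).mp hq).2)
        (fun q hq => pvD2_range area.length C hH hC q ((mem_pvCells _ _ _).mp hq).1 ((mem_pvCells _ _ _).mp hq).2)]
      rw [if_pos ⟨(mem_pvCells _ _ _).mpr (pvI2_range area.length C p h1 h2), pvD2_I2 area.length C hH hC p h1 h2⟩]
    -- ===== A's overwrite pass, normalized =====
    have e2 : pvOverwriteArea tempF area (C : Int) = (pvCells area.length C).foldl
        (fun t q => if pvG t q.1 q.2 ≠ -1 then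
          pvS t q (if pvG tempF q.1 q.2 = -1 then 0 else pvG tempF q.1 q.2) else t) area := by
      simp only [pvOverwriteArea]
      rw [nested_foldl_eq_cells]
      refine pvFoldlCongrInv (fun t => pvDims t area.length (fun i => (area.getD i []).length)) _ _ _ _
        ⟨rfl, fun i hi => rfl⟩ ?_
      intro s q hs hq
      rw [mem_pvCells] at hq
      have hset : ∀ v : Int, pySet2 s (q.1 : Int) (q.2 : Int) v = pvS s q v := by
        intro v
        have := pySet2_cast s (q.1 : Int) (q.2 : Int) q.1 q.2 v rfl rfl (by have := hs.1; omega)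
        simpa using this
      constructor
      · rw [pvG_natCast, pvG_natCast]
        by_cases hv : pvG s q.1 q.2 ≠ -1
        · rw [if_pos hv, if_pos hv]
          by_cases ht : pvG tempF q.1 q.2 = -1
          · rw [if_pos ht, if_pos ht, hset]
          · rw [if_neg ht, if_neg ht, hset]
        · rw [if_neg hv, if_neg hv]
      · split
        · exact pvDims_pvS _ _ _ _ _ hs
        · exact hs
    -- ===== B, normalized =====
    have e3 : pvBlow area (C : Int) pvUpstream2 = (pvCells area.length C).foldl
        (fun t q => if decide (pvG area q.1 q.2 ≠ -1) then
          pvS t q (if pvG area (pvI2 area.length C q).1 (pvI2 area.length C q).2 = -1 then 0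
            else pvG area (pvI2 area.length C q).1 (pvI2 area.length C q).2) else t) area := by
      simp only [pvBlow]
      rw [nested_foldl_eq_cells]
      refine pvFoldlCongrInv (fun t => pvDims t area.length (fun i => (area.getD i []).length)) _ _ _ _
        ⟨rfl, fun i hi => rfl⟩ ?_
      intro s q hs hq
      rw [mem_pvCells] at hq
      have hset : ∀ v : Int, pySet2 s (q.1 : Int) (q.2 : Int) v = pvS s q v := by
        intro v
        have := pySet2_cast s (q.1 : Int) (q.2 : Int) q.1 q.2 v rfl rfl (by have := hs.1; omega)
        simpa using this
      have hup : pvUpstream2 ((area.length : Nat) : Int) ((C : Nat) : Int) (q.1 : Int) (q.2 : Int)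
          = (((pvI2 area.length C q).1 : Int), ((pvI2 area.length C q).2 : Int)) := by
        have := pvUpstream2_cast area.length C hH hC q.1 q.2 hq.1 hq.2
        simpa using this
      constructor
      · simp only [hup, pvG_natCast]
        rw [hset]
        by_cases hv : pvG area q.1 q.2 ≠ -1
        · rw [if_pos hv, if_pos (decide_eq_true_iff.mpr hv)]
        · rw [if_neg hv, if_neg (by rw [decide_eq_true_iff]; exact hv)]
      · split
        · exact pvDims_pvS _ _ _ _ _ hs
        · exact hs
    -- ===== compare pointwise =====
    rw [e1, e2, e3]
    have hbase : pvDims area area.length (fun i => (area.getD i []).length) :=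
      ⟨rfl, fun i hi => rfl⟩
    have hdimsA := pvFoldlInv (fun t => pvDims t area.length (fun i => (area.getD i []).length))
      (fun t q => if pvG t q.1 q.2 ≠ -1 then
          pvS t q (if pvG tempF q.1 q.2 = -1 then 0 else pvG tempF q.1 q.2) else t)
      (pvCells area.length C) area hbase
      (fun s q hq hs => by
        dsimp only
        split
        · exact pvDims_pvS _ _ _ _ _ hs
        · exact hs)
    have hdimsB := pvFoldlInv (fun t => pvDims t area.length (fun i => (area.getD i []).length))
      (fun t q => if decide (pvG area q.1 q.2 ≠ -1) then
          pvS t q (if pvG area (pvI2 area.length C q).1 (pvI2 area.length C q).2 = -1 then 0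
            else pvG area (pvI2 area.length C q).1 (pvI2 area.length C q).2) else t)
      (pvCells area.length C) area hbase
      (fun s q hq hs => by
        dsimp only
        split
        · exact pvDims_pvS _ _ _ _ _ hs
        · exact hs)
    refine pvGridExt _ _ (by rw [hdimsA.1, hdimsB.1]) ?_ ?_
    · intro i hi
      rw [hdimsA.1] at hi
      rw [hdimsA.2 i hi, hdimsB.2 i hi]
    · intro y x
      rw [pvMapFold (pvCells area.length C)
        (fun q => if pvG tempF q.1 q.2 = -1 then 0 else pvG tempF q.1 q.2)
        area area.length (fun i => (area.getD i []).length)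
        hbase (nodup_pvCells _ _)
        (fun q hq => ⟨((mem_pvCells _ _ _).mp hq).1,
          lt_of_lt_of_le ((mem_pvCells _ _ _).mp hq).2 (hWa _ ((mem_pvCells _ _ _).mp hq).1)⟩) (y, x)]
      rw [pvMapFoldFixed (pvCells area.length C)
        (fun q => decide (pvG area q.1 q.2 ≠ -1))
        (fun q => if pvG area (pvI2 area.length C q).1 (pvI2 area.length C q).2 = -1 then 0
            else pvG area (pvI2 area.length C q).1 (pvI2 area.length C q).2)
        area (y, x) (nodup_pvCells _ _)
        (fun hm _ => ⟨((mem_pvCells _ _ _).mp hm).1,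
          lt_of_lt_of_le ((mem_pvCells _ _ _).mp hm).2 (hWa _ ((mem_pvCells _ _ _).mp hm).1)⟩)]
      by_cases hm : (y, x) ∈ pvCells area.length C
      · have hyx := (mem_pvCells _ _ _).mp hm
        have hS := htF (y, x) hyx.1 hyx.2
        by_cases hv : pvG area y x ≠ -1
        · simp [hm, hv, hS]
        · simp [hm, hv]
      · simp [hm]
-- A's find?-with-break loop body equals B's any-based body
theorem pvCleanerEq (r c : Int) (room : List (List Int)) :
    (PySem.List.pyRange 0 r 1).foldl (fun cy y =>
      match (PySem.List.pyRange 0 c 1).find? (fun x => pvGet2 room y x == -1) with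
      | some _ => some y
      | none => cy) none
    = (PySem.List.pyRange 0 r 1).foldl (fun cy y =>
      if (PySem.List.pyRange 0 c 1).any (fun x => pvGet2 room y x == -1) then some y else cy) none := by
  refine PySem.List.foldl_congr_mem _ _ _ _ ?_
  intro cy y hy
  rcases h : (PySem.List.pyRange 0 c 1).find? (fun x => pvGet2 room y x == -1) with _ | x
  · rw [if_neg ?_]
    rw [List.any_eq_true]
    rintro ⟨a, ha, hp⟩
    exact absurd hp (by simpa using List.find?_eq_none.mp h a ha)
  · rw [if_pos (List.any_eq_true.mpr ⟨x, List.mem_of_find?_eq_some h, List.find?_some h⟩)]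

-- the "remember the last row that fired" loop
theorem pvLastFlag (P : Int → Bool) (n k : Nat) (hk : k < n) (hPk : P (k : Int) = true)
    (hafter : ∀ j : Nat, j < n → k < j → P (j : Int) = false) :
    (List.range n).foldl (fun cy (i : Nat) => if P (i : Int) then some ((i : Int)) else cy) none
      = some (k : Int) := by
  have hsplit : n = (k + 1) + (n - (k + 1)) := by omega
  rw [hsplit, List.range_add, List.foldl_append, List.range_succ, List.foldl_append]
  have h1 : ∀ acc : Option Int,
      List.foldl (fun cy (i : Nat) => if P (i : Int) then some ((i : Int)) else cy) acc [k]
        = some (k : Int) := by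
    intro acc; simp [hPk]
  rw [h1, List.foldl_map]
  refine Eq.trans (PySem.List.foldl_congr_mem _ _ _ _ ?_) (PySem.List.foldl_ignore _ _)
  intro acc j hj
  rw [List.mem_range] at hj
  have hP : P ((k : Int) + 1 + (j : Int)) = false := by
    have := hafter (k + 1 + j) (by omega) (by omega)
    push_cast at this
    exact this
  simp [hP]

-- row flag ↔ a -1 among the first C entries
theorem pvFlagIff (c : Int) (room : List (List Int)) (C : Nat) (hc : c = (C : Int)) (j : Nat) :
    ((PySem.List.pyRange 0 c 1).any (fun x => pvGet2 room (j : Int) x == -1) = true)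
      ↔ ∃ x : Nat, x < C ∧ pvG room j x = -1 := by
  subst hc
  rw [List.any_eq_true]
  constructor
  · rintro ⟨a, ha, hp⟩
    rw [PySem.List.mem_pyRange_one] at ha
    refine ⟨a.toNat, by omega, ?_⟩
    rw [← pvG_natCast]
    have hcast : ((a.toNat : Nat) : Int) = a := by omega
    rw [hcast]
    simpa using hp
  · rintro ⟨x, hx, hG⟩
    refine ⟨(x : Int), ?_, ?_⟩
    · rw [PySem.List.mem_pyRange_one]; omega
    · rw [pvG_natCast]; simpa using hG
theorem pySet1_length (row : List Int) (i : Int) (v : Int) :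
    (pySet1 row i v).length = row.length := by
  unfold pySet1; dsimp only; split_ifs <;> simp

theorem pySet2_length (g : List (List Int)) (a b v : Int) :
    (pySet2 g a b v).length = g.length := by
  unfold pySet2; dsimp only; split_ifs <;> simp

theorem pySet2_rowlen (g : List (List Int)) (a b v : Int) (i : Nat) :
    ((pySet2 g a b v).getD i []).length = (g.getD i []).length := by
  unfold pySet2
  dsimp only
  split_ifs <;>
    first
      | rfl
      | (rw [List.getD_eq_getElem?_getD, List.getD_eq_getElem?_getD, List.getElem?_modify]
         cases g[i]? with
         | none => rfl
         | some row =>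
           simp only [Option.map_eq_map, Option.map_some, Option.getD_some]
           split <;> simp [pySet1_length])

-- B's gather pass never changes the shape of the grid
theorem pvBlow_dims (area : List (List Int)) (c : Int) (up : Int → Int → Int → Int → Int × Int) :
    (pvBlow area c up).length = area.length ∧
      ∀ i : Nat, ((pvBlow area c up).getD i []).length = (area.getD i []).length := by
  unfold pvBlow
  refine pvFoldlInv (fun g : List (List Int) => g.length = area.length ∧
      ∀ i : Nat, (g.getD i []).length = (area.getD i []).length) _ _ _ ⟨rfl, fun _ => rfl⟩ ?_
  intro s y hy hs
  refine pvFoldlInv (fun g : List (List Int) => g.length = area.length ∧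
      ∀ i : Nat, (g.getD i []).length = (area.getD i []).length) _ _ _ hs ?_
  intro s' x hx hs'
  dsimp only
  split
  · exact ⟨(pySet2_length ..).trans hs'.1, fun i => (pySet2_rowlen ..).trans (hs'.2 i)⟩
  · exact hs'

-- c ≤ 0 : range(c) is empty, so no pass touches anything
theorem pvWindArea1_cle0 (g : List (List Int)) (c : Int) (hc : c ≤ 0) : pvWindArea1 g c = g := by
  simp [pvWindArea1, pvOverwriteArea, PySem.List.pyRange_one_eq_nil hc]

theorem pvWindArea2_cle0 (g : List (List Int)) (c : Int) (hc : c ≤ 0) : pvWindArea2 g c = g := by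
  simp [pvWindArea2, pvOverwriteArea, PySem.List.pyRange_one_eq_nil hc]

theorem pvBlow_cle0 (g : List (List Int)) (c : Int) (up : Int → Int → Int → Int → Int × Int)
    (hc : c ≤ 0) : pvBlow g c up = g := by
  simp [pvBlow, PySem.List.pyRange_one_eq_nil hc]

-- the empty grid is fixed by every pass
theorem pvWindArea1_nil (c : Int) : pvWindArea1 [] c = [] := by
  simp [pvWindArea1, pvOverwriteArea, PySem.List.pyRange_one]

theorem pvWindArea2_nil (c : Int) : pvWindArea2 [] c = [] := by
  simp [pvWindArea2, pvOverwriteArea, PySem.List.pyRange_one]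

theorem pvBlow_nil (c : Int) (up : Int → Int → Int → Int → Int × Int) : pvBlow [] c up = [] := by
  simp [pvBlow, PySem.List.pyRange_one]

-- the scan loop over Int indices as a loop over Nat indices
theorem pvScanEq (r c : Int) (room : List (List Int)) :
    (PySem.List.pyRange 0 r 1).foldl (fun cy y =>
      if (PySem.List.pyRange 0 c 1).any (fun x => pvGet2 room y x == -1) then some y else cy) none
    = (List.range r.toNat).foldl (fun cy (i : Nat) =>
        if (PySem.List.pyRange 0 c 1).any (fun x => pvGet2 room (i : Int) x == -1)
        then some ((i : Int)) else cy) none := by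
  rw [PySem.List.pyRange_one 0 r, List.foldl_map]
  have hn : (r - 0).toNat = r.toNat := by omega
  rw [hn]
  refine PySem.List.foldl_congr_mem _ _ _ _ ?_
  intro acc i hi
  simp only [zero_add]

-- a loop that never fires returns its initial accumulator
theorem pvNoFlag (P : Int → Bool) (n : Nat) (h : ∀ j : Nat, j < n → P (j : Int) = false) :
    (List.range n).foldl (fun cy (i : Nat) => if P (i : Int) then some ((i : Int)) else cy) none
      = none := by
  refine Eq.trans (PySem.List.foldl_congr_mem _ _ _ _ ?_) (PySem.List.foldl_ignore _ _)
  intro acc j hj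
  rw [List.mem_range] at hj
  simp [h j hj]
-- ===== VERDICT (by name: the statement is the Claim_ definition above) =====
theorem wind_dust_spec : Claim_equal_wind_dust := by
  intro r c room hdom hpre
  unfold Spec_wind_dust
  simp only [wind_dust, wind_dust_alt]
  rw [pvCleanerEq]
  rcases hpre with hc0 | ⟨hc1, hrlen, hrows, hnone, hshape⟩ |
    ⟨hc2, hrlen, hrows, k, hk, hk02, hk2len, hx, hafter⟩
  · -- (1) c ≤ 0: nothing is ever read or written
    have hcl : (PySem.List.pyRange 0 r 1).foldl (fun cy y =>
        if (PySem.List.pyRange 0 c 1).any (fun x => pvGet2 room y x == -1) then some y else cy) none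
        = (none : Option Int) := by
      rw [pvScanEq]
      refine pvNoFlag (fun y => (PySem.List.pyRange 0 c 1).any fun x => pvGet2 room y x == -1)
        r.toNat ?_
      intro j hj
      rw [PySem.List.pyRange_one_eq_nil hc0]
      rfl
    rw [hcl]
    rw [pvWindArea1_cle0 _ _ hc0, pvWindArea2_cle0 _ _ hc0,
      pvBlow_cle0 _ _ _ hc0, pvBlow_cle0 _ _ _ hc0]
  · -- (2) the scan completes without finding a purifier cell
    have hc : c = (c.toNat : Int) := by omega
    set C := c.toNat with hCdef
    have hcl : (PySem.List.pyRange 0 r 1).foldl (fun cy y =>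
        if (PySem.List.pyRange 0 c 1).any (fun x => pvGet2 room y x == -1) then some y else cy) none
        = (none : Option Int) := by
      rw [pvScanEq]
      refine pvNoFlag (fun y => (PySem.List.pyRange 0 c 1).any fun x => pvGet2 room y x == -1)
        r.toNat ?_
      intro j hj
      rw [← Bool.not_eq_true, pvFlagIff c room C hc j]
      rintro ⟨x, hxC, hG⟩
      exact hnone j hj x hxC hG
    rw [hcl]
    rcases hshape with h0 | ⟨hlen2, hcge2⟩
    · rw [List.length_eq_zero_iff] at h0
      subst h0
      rw [pvWindArea1_nil, pvWindArea2_nil, pvBlow_nil, pvBlow_nil]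
    · have hC2 : 2 ≤ C := by omega
      have hrowsC : ∀ row ∈ room, C ≤ row.length := by
        intro row hrow
        have := hrows row hrow
        omega
      rw [pvRegion1 room c C hc hC2 hrowsC (Or.inr hlen2)]
      have hdims := pvBlow_dims room c pvUpstream1
      have hrowsX : ∀ row ∈ pvBlow room c pvUpstream1, C ≤ row.length := by
        intro row hrow
        obtain ⟨i, hi, hEq⟩ := List.getElem_of_mem hrow
        have hiR : i < room.length := by rw [← hdims.1]; exact hi
        have h1 : ((pvBlow room c pvUpstream1).getD i []).length = (room.getD i []).length :=
          hdims.2 i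
        rw [List.getD_eq_getElem _ _ hi, hEq, List.getD_eq_getElem _ _ hiR] at h1
        rw [h1]
        exact hrowsC _ (List.getElem_mem hiR)
      rw [pvRegion2 (pvBlow room c pvUpstream1) c C hc hC2 hrowsX
        (by rw [hdims.1]; omega)]
  · -- (3) a purifier row k is found
    obtain ⟨x0, hx0, hx0v⟩ := hx
    have hc : c = (c.toNat : Int) := by omega
    set C := c.toNat with hCdef
    have hC : 2 ≤ C := by omega
    have hrowsC : ∀ row ∈ room, C ≤ row.length := by
      intro row hrow
      have := hrows row hrow
      omega
    have hcl : (PySem.List.pyRange 0 r 1).foldl (fun cy y =>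
        if (PySem.List.pyRange 0 c 1).any (fun x => pvGet2 room y x == -1) then some y else cy) none
        = some (k : Int) := by
      rw [pvScanEq]
      refine pvLastFlag (fun y => (PySem.List.pyRange 0 c 1).any fun x => pvGet2 room y x == -1)
        r.toNat k hk ?_ ?_
      · exact (pvFlagIff c room C hc k).mpr ⟨x0, hx0, hx0v⟩
      · intro j hj hkj
        rw [← Bool.not_eq_true, pvFlagIff c room C hc j]
        rintro ⟨x, hxC, hG⟩
        exact hafter j hj hkj x hxC hG
    rw [hcl]
    dsimp only
    rw [PySem.List.slice_zero_start, PySem.List.slice_to_natCast, PySem.List.slice_from_natCast]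
    have htake_len : (room.take k).length = k := by
      rw [List.length_take]; omega
    have hdrop_len : (room.drop k).length = room.length - k := by
      rw [List.length_drop]
    rw [pvRegion1 (room.take k) c C hc hC
      (fun row hrow => hrowsC row (List.mem_of_mem_take hrow))
      (by rw [htake_len]; omega)]
    rw [pvRegion2 (room.drop k) c C hc hC
      (fun row hrow => hrowsC row (List.mem_of_mem_drop hrow))
      (by rw [hdrop_len]; omega)]
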